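-- pv_equiv track=rewrite | github.com/mjyt13/lab04 | main.py | quantity_same_elem
-- ===== SOURCE A (Python) =====
-- def quantity_same_elem(lists):
--     same_elems = {}
--     same_quan = []
--     for list in lists:
--         for elem in list:
--             if elem not in same_elems:
--                 same_elems[elem] = 0
--             else:
--                 same_elems[elem] += 1
--     for elem in same_elems:
--         if same_elems[elem] > 1:
--             str_elem = str(elem)
--             str_quan = str(same_elems[elem])
--             same_quan.append((str_elem+' : '+str_quan+' times '))
--     return same_quan
-- ===== SOURCE B (Python) =====
-- def quantity_same_elem(lists):
--     all_elems = [e for l in lists for e in l]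
--     seen = set()
--     out = []
--     for elem in all_elems:
--         if elem not in seen:
--             seen.add(elem)
--             c = all_elems.count(elem)
--             if c - 1 > 1:
--                 out.append(str(elem) + ' : ' + str(c - 1) + ' times ')
--     return out
-- ===== Notes on version B (the rewrite author's own statement) =====
-- stated objective: alternative
-- what changed: Replaces A's two-phase dict accumulation (build a count dict, then scan its keys) by a single scan of the flattened list with a seen-set, computing each element's multiplicity on first occurrence via list.count and emitting the line immediately.
import Mathlib
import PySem

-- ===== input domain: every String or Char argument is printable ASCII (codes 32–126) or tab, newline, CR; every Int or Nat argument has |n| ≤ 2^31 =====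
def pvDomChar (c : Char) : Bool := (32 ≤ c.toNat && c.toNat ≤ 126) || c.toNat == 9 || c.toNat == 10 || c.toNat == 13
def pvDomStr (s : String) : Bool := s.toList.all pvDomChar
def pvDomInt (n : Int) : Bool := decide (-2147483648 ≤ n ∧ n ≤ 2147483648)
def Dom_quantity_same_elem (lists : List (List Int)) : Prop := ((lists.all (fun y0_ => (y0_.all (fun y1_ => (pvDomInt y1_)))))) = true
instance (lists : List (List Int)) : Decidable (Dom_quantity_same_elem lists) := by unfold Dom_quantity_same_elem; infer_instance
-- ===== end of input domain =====

-- B replaces A's two-phase dict accumulation by a single seen-set scan of the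
-- flattened list that counts each element on its first occurrence (alternative
-- decomposition, not claimed faster).

-- ===== PORT A =====
def quantity_same_elem (lists : List (List Int)) : List String :=
  let same_elems : PySem.Dict Int Int :=
    lists.foldl (fun d l =>
      l.foldl (fun d elem =>
        if !(d.contains elem) then d.insert elem 0
        else d.insert elem (d.getD elem 0 + 1)) d) PySem.Dict.empty
  same_elems.keys.foldl (fun same_quan elem =>
    if same_elems.getD elem 0 > 1 then
      same_quan ++ [PySem.Int.toStr elem ++ " : " ++ PySem.Int.toStr (same_elems.getD elem 0) ++ " times "]
    else same_quan) []

-- ===== PORT B =====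
def quantity_same_elem_alt (lists : List (List Int)) : List String :=
  let all_elems : List Int := lists.flatMap (fun l => l)
  (all_elems.foldl (fun (st : PySem.Set Int × List String) elem =>
      if !(PySem.Set.contains st.1 elem) then
        let seen := PySem.Set.add st.1 elem
        let c : Int := all_elems.count elem
        if c - 1 > 1 then
          (seen, st.2 ++ [PySem.Int.toStr elem ++ " : " ++ PySem.Int.toStr (c - 1) ++ " times "])
        else (seen, st.2)
      else st) (PySem.Set.empty, [])).2

-- ===== PRECONDITION & SPEC =====
def Spec_quantity_same_elem (lists : List (List Int)) (out : List String) : Prop := out = quantity_same_elem_alt lists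
instance (lists : List (List Int)) (out : List String) : Decidable (Spec_quantity_same_elem lists out) := by unfold Spec_quantity_same_elem; infer_instance

-- ===== CLAIM (what is proved, stated in full; the proofs are below) =====
def Claim_equal_quantity_same_elem : Prop := ∀ (lists : List (List Int)), Dom_quantity_same_elem lists → Spec_quantity_same_elem lists (quantity_same_elem lists)

-- ===== LEMMAS AND PROOFS =====

-- the canonical value both programs compute: for each first occurrence in the
-- flattened list, if its total count c has c - 1 > 1, the line "e : c-1 times "
def pvCanon (all : List Int) : List String :=
  ((PySem.Set.ofList all).filter (fun e => decide (((all.count e : Int)) - 1 > 1))).map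
    (fun e => PySem.Int.toStr e ++ " : " ++ PySem.Int.toStr ((all.count e : Int) - 1) ++ " times ")

-- A's dict-building step is an unconditional insert of previous-value(+default -1) + 1
lemma stepA_eq (d : PySem.Dict Int Int) (e : Int) :
    (if !(d.contains e) then d.insert e 0 else d.insert e (d.getD e 0 + 1))
      = d.insert e (d.getD e (-1) + 1) := by
  by_cases h : d.contains e = true
  · have hs : (d.get? e).isSome := by rw [← PySem.Dict.contains_eq_isSome_get?]; exact h
    obtain ⟨v, hv⟩ := Option.isSome_iff_exists.mp hs
    simp [h, PySem.Dict.getD_of_get?_eq_some d 0 hv, PySem.Dict.getD_of_get?_eq_some d (-1) hv]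
  · have h' : d.contains e = false := by simpa using h
    simp [h', PySem.Dict.getD_of_not_contains d (-1) h']

lemma getD_foldA (l : List Int) (d : PySem.Dict Int Int) (v : Int) :
    (l.foldl (fun d e => d.insert e (d.getD e (-1) + 1)) d).getD v (-1)
      = d.getD v (-1) + (l.count v : Int) := by
  induction l generalizing d with
  | nil => simp
  | cons x xs ih =>
    simp only [List.foldl_cons, ih, PySem.Dict.getD_insert, List.count_cons]
    by_cases h : v = x
    · subst h; simp; omega
    · simp [h, (Ne.symm h : x ≠ v)]

-- A reduces to the canonical form
lemma A_eq_canon (lists : List (List Int)) :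
    quantity_same_elem lists = pvCanon (lists.flatMap (fun l => l)) := by
  simp only [quantity_same_elem, pvCanon]
  have hfl : lists.flatMap (fun l => l) = lists.flatten := by simp
  rw [hfl]
  rw [show (lists.foldl (fun d l =>
        l.foldl (fun d elem =>
          if !(d.contains elem) then d.insert elem 0
          else d.insert elem (d.getD elem 0 + 1)) d) PySem.Dict.empty)
      = lists.flatten.foldl (fun d e => d.insert e (d.getD e (-1) + 1)) PySem.Dict.empty from by
    rw [List.foldl_flatten]
    congr 1
    funext d l
    congr 1
    funext d e
    exact stepA_eq d e]
  set dA := lists.flatten.foldl (fun d e => d.insert e (d.getD e (-1) + 1)) PySem.Dict.empty with hdA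
  have hkeys : dA.keys = PySem.Set.ofList lists.flatten := by
    rw [hdA, PySem.Dict.keys_foldl_insert]
    simp [PySem.Set.update_nil_left]
  have hval : ∀ e ∈ lists.flatten, dA.getD e 0 = (lists.flatten.count e : Int) - 1 := by
    intro e he
    have hc : dA.contains e = true := by
      rw [PySem.Dict.contains_iff_mem_keys, hkeys]
      exact (PySem.Set.mem_ofList _ _).mpr he
    have hs : (dA.get? e).isSome := by rw [← PySem.Dict.contains_eq_isSome_get?]; exact hc
    obtain ⟨v, hv⟩ := Option.isSome_iff_exists.mp hs
    have h1 := PySem.Dict.getD_of_get?_eq_some dA (0 : Int) hv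
    have h2 := PySem.Dict.getD_of_get?_eq_some dA (-1 : Int) hv
    have h3 : dA.getD e (-1) = -1 + (lists.flatten.count e : Int) := by
      rw [hdA, getD_foldA]; simp
    rw [h1, h2.symm.trans h3]; ring
  have hfold := PySem.List.foldl_append_if (fun e => decide (dA.getD e 0 > 1))
        (fun e => PySem.Int.toStr e ++ " : " ++ PySem.Int.toStr (dA.getD e 0) ++ " times ") dA.keys []
  simp only [decide_eq_true_eq] at hfold
  rw [hfold, hkeys]
  simp only [List.nil_append]
  have hmem : ∀ e ∈ PySem.Set.ofList lists.flatten, e ∈ lists.flatten := by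
    intro e he; exact (PySem.Set.mem_ofList _ _).mp he
  rw [List.filter_congr (q := fun e => decide (((lists.flatten.count e : Int)) - 1 > 1))
    (fun e he => by rw [hval e (hmem e he)])]
  apply List.map_congr_left
  intro e he
  have he' : e ∈ PySem.Set.ofList lists.flatten := List.mem_of_mem_filter he
  rw [hval e (hmem e he')]

-- B's loop invariant: starting from the state reached after a prefix p, the
-- loop over l finishes in the state reached after p ++ l
lemma B_inv (all : List Int) (l : List Int) : ∀ (p : List Int),
    (l.foldl (fun (st : PySem.Set Int × List String) elem =>
        if !(PySem.Set.contains st.1 elem) then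
          let seen := PySem.Set.add st.1 elem
          let c : Int := all.count elem
          if c - 1 > 1 then
            (seen, st.2 ++ [PySem.Int.toStr elem ++ " : " ++ PySem.Int.toStr (c - 1) ++ " times "])
          else (seen, st.2)
        else st)
      (PySem.Set.ofList p,
        ((PySem.Set.ofList p).filter (fun e => decide (((all.count e : Int)) - 1 > 1))).map
          (fun e => PySem.Int.toStr e ++ " : " ++ PySem.Int.toStr ((all.count e : Int) - 1) ++ " times ")))
    = (PySem.Set.ofList (p ++ l),
        ((PySem.Set.ofList (p ++ l)).filter (fun e => decide (((all.count e : Int)) - 1 > 1))).map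
          (fun e => PySem.Int.toStr e ++ " : " ++ PySem.Int.toStr ((all.count e : Int) - 1) ++ " times ")) := by
  induction l with
  | nil => intro p; simp
  | cons x xs ih =>
    intro p
    have happ : p ++ x :: xs = (p ++ [x]) ++ xs := by simp
    rw [happ, List.foldl_cons]
    by_cases hx : x ∈ PySem.Set.ofList p
    · have hxp : x ∈ p := (PySem.Set.mem_ofList _ _).mp hx
      have hsame : PySem.Set.ofList (p ++ [x]) = PySem.Set.ofList p := by
        rw [PySem.Set.ofList_append_singleton, PySem.Set.add_of_mem hx]
      rw [show (if !(PySem.Set.contains (PySem.Set.ofList p) x) then _ else _) =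
          (PySem.Set.ofList p,
            ((PySem.Set.ofList p).filter (fun e => decide (((all.count e : Int)) - 1 > 1))).map
              (fun e => PySem.Int.toStr e ++ " : " ++ PySem.Int.toStr ((all.count e : Int) - 1) ++ " times "))
        from by simp [hxp]]
      rw [← hsame] at *
      exact ih (p ++ [x])
    · have hxp : x ∉ p := fun h => hx ((PySem.Set.mem_ofList _ _).mpr h)
      have hadd : PySem.Set.ofList (p ++ [x]) = PySem.Set.ofList p ++ [x] := by
        rw [PySem.Set.ofList_append_singleton, PySem.Set.add_of_not_mem hx]
      have hfil : ((PySem.Set.ofList (p ++ [x])).filter (fun e => decide (((all.count e : Int)) - 1 > 1))).map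
            (fun e => PySem.Int.toStr e ++ " : " ++ PySem.Int.toStr ((all.count e : Int) - 1) ++ " times ")
          = ((PySem.Set.ofList p).filter (fun e => decide (((all.count e : Int)) - 1 > 1))).map
              (fun e => PySem.Int.toStr e ++ " : " ++ PySem.Int.toStr ((all.count e : Int) - 1) ++ " times ")
            ++ (if ((all.count x : Int)) - 1 > 1 then
                  [PySem.Int.toStr x ++ " : " ++ PySem.Int.toStr ((all.count x : Int) - 1) ++ " times "]
                else []) := by
        rw [hadd, List.filter_append, List.map_append]
        by_cases hp : ((all.count x : Int)) - 1 > 1 <;> simp [hp]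
      rw [show (if !(PySem.Set.contains (PySem.Set.ofList p) x) then _ else _) =
          (PySem.Set.ofList (p ++ [x]),
            ((PySem.Set.ofList (p ++ [x])).filter (fun e => decide (((all.count e : Int)) - 1 > 1))).map
              (fun e => PySem.Int.toStr e ++ " : " ++ PySem.Int.toStr ((all.count e : Int) - 1) ++ " times "))
        from by
          rw [hfil, hadd, ← PySem.Set.add_of_not_mem hx]
          by_cases hp : ((all.count x : Int)) - 1 > 1 <;> simp [hxp, hp]]
      exact ih (p ++ [x])

lemma B_eq_canon (lists : List (List Int)) :
    quantity_same_elem_alt lists = pvCanon (lists.flatMap (fun l => l)) := by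
  unfold quantity_same_elem_alt pvCanon
  have := B_inv (lists.flatMap (fun l => l)) (lists.flatMap (fun l => l)) []
  simp only [PySem.Set.ofList_nil, List.filter_nil, List.map_nil, List.nil_append] at this
  rw [show PySem.Set.empty = PySem.Set.ofList ([] : List Int) from rfl]
  simp only [PySem.Set.ofList_nil]
  rw [this]

-- ===== VERDICT (by name: the statement is the Claim_ definition above) =====
theorem quantity_same_elem_spec : Claim_equal_quantity_same_elem := by
  intro lists _
  unfold Spec_quantity_same_elem
  rw [A_eq_canon, B_eq_canon]
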